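-- pv_equiv track=rewrite | github.com/NorthMa04/auto_versus_conventional | wcd_lesmis_gated_full.py | build_dim_schedule
-- ===== SOURCE A (Python) =====
-- def build_dim_schedule(T_max, stage_dims, layers_per_stage=3,
--                        use_bottleneck8=True, bottleneck_after_dim=16,
--                        bottleneck_dim=8, bottleneck_layers=1,
--                        post_bottleneck_dim=16):
--     schedule = []
--     for d in stage_dims:
--         schedule.extend([d] * layers_per_stage)
--
--     bottleneck_used = False
--     out = []
--     for t in range(1, T_max + 1):
--         if t <= len(schedule):
--             out.append(schedule[t - 1])
--             continue
--
--         # after staged compression finished, we are at the last stage dim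
--         current_floor = stage_dims[-1]
--
--         if use_bottleneck8 and (not bottleneck_used) and current_floor == bottleneck_after_dim:
--             # insert one-time bottleneck
--             for _ in range(bottleneck_layers):
--                 if len(out) >= T_max:
--                     break
--                 out.append(bottleneck_dim)
--             bottleneck_used = True
--             # if we still need more layers after bottleneck, fill with post_bottleneck_dim
--             while len(out) < T_max:
--                 out.append(post_bottleneck_dim)
--             break
--         else:
--             out.append(current_floor)
--
--     return out[:T_max]
-- ===== SOURCE B (Python) =====
-- def build_dim_schedule(T_max, stage_dims, layers_per_stage=3,
--                        use_bottleneck8=True, bottleneck_after_dim=16,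
--                        bottleneck_dim=8, bottleneck_layers=1,
--                        post_bottleneck_dim=16):
--     schedule = [d for d in stage_dims for _ in range(layers_per_stage)]
--     if T_max <= 0:
--         return []
--     if T_max <= len(schedule):
--         return schedule[:T_max]
--     remaining = T_max - len(schedule)
--     floor = stage_dims[-1]
--     if use_bottleneck8 and floor == bottleneck_after_dim:
--         k = min(max(bottleneck_layers, 0), remaining)
--         return schedule + [bottleneck_dim] * k + [post_bottleneck_dim] * (remaining - k)
--     return schedule + [floor] * remaining
-- ===== Notes on version B (the rewrite author's own statement) =====
-- stated objective: simpler
-- what changed: Replaces the per-timestep loop with its bottleneck_used flag, inner break loop and trailing while-fill by direct block construction: a prefix of the expanded schedule plus closed-form repeated blocks computed from remaining = T_max - len(schedule).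
import Mathlib
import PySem

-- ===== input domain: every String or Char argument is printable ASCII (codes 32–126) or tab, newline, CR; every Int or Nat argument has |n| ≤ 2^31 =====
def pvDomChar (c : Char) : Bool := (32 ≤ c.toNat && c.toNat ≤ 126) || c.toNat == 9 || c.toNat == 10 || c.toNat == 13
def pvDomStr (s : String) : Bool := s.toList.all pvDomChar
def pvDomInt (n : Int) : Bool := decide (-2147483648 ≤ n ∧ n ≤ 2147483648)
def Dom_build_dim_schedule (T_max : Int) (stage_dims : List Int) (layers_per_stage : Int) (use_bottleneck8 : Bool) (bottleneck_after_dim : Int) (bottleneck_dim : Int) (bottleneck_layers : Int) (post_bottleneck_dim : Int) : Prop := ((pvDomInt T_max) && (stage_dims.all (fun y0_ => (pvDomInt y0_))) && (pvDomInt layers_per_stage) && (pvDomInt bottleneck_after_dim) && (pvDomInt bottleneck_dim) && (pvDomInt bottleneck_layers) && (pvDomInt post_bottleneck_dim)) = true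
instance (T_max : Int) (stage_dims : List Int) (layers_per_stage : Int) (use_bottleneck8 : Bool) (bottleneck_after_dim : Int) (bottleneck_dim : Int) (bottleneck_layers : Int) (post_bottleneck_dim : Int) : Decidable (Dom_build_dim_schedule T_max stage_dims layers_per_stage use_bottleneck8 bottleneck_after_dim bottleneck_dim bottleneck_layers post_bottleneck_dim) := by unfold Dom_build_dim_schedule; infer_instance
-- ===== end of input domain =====

-- B replaces A's per-timestep loop (with bottleneck_used flag, inner break loop and
-- trailing while-fill) by direct block construction: schedule prefix + closed-form
-- repeated blocks.  Objective: simpler.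

-- ===== PORT A =====

-- 'for _ in range(bottleneck_layers): if len(out) >= T_max: break; out.append(bottleneck_dim)'
def bdsInnerFor : Nat → Int → Int → List Int → List Int
  | 0, _, _, out => out
  | n + 1, T_max, bd, out =>
    if (out.length : Int) ≥ T_max then out
    else bdsInnerFor n T_max bd (out ++ [bd])

-- 'while len(out) < T_max: out.append(post_bottleneck_dim)'; fuel (T_max - len out).toNat
-- bounds the iteration count exactly (each step grows out by one).
def bdsWhileFill : Nat → Int → Int → List Int → List Int
  | 0, _, _, out => out
  | n + 1, T_max, pb, out =>
    if (out.length : Int) < T_max then bdsWhileFill n T_max pb (out ++ [pb])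
    else out

-- 'for t in range(1, T_max + 1)': fuel = number of remaining iterations, t carried along.
def bdsLoop (fuel : Nat) (t : Int) (schedule stage_dims : List Int) (T_max : Int)
    (use_bottleneck8 : Bool) (bottleneck_after_dim bottleneck_dim bottleneck_layers post_bottleneck_dim : Int)
    (bottleneck_used : Bool) (out : List Int) : List Int :=
  match fuel with
  | 0 => out
  | f + 1 =>
    if t ≤ (schedule.length : Int) then
      bdsLoop f (t + 1) schedule stage_dims T_max use_bottleneck8 bottleneck_after_dim
        bottleneck_dim bottleneck_layers post_bottleneck_dim bottleneck_used
        (out ++ [(PySem.List.pyGet? schedule (t - 1)).getD 0])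
    else
      let current_floor := (PySem.List.pyGet? stage_dims (-1)).getD 0
      if use_bottleneck8 && !bottleneck_used && (current_floor == bottleneck_after_dim) then
        let out2 := bdsInnerFor bottleneck_layers.toNat T_max bottleneck_dim out
        bdsWhileFill (T_max - out2.length).toNat T_max post_bottleneck_dim out2  -- then break
      else
        bdsLoop f (t + 1) schedule stage_dims T_max use_bottleneck8 bottleneck_after_dim
          bottleneck_dim bottleneck_layers post_bottleneck_dim bottleneck_used
          (out ++ [current_floor])

def build_dim_schedule (T_max : Int) (stage_dims : List Int) (layers_per_stage : Int) (use_bottleneck8 : Bool) (bottleneck_after_dim : Int) (bottleneck_dim : Int) (bottleneck_layers : Int) (post_bottleneck_dim : Int) : List Int :=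
  let schedule := stage_dims.foldl (fun acc d => acc ++ List.replicate layers_per_stage.toNat d) []
  let out := bdsLoop T_max.toNat 1 schedule stage_dims T_max use_bottleneck8
      bottleneck_after_dim bottleneck_dim bottleneck_layers post_bottleneck_dim false []
  PySem.List.slice out none (some T_max)

-- ===== PORT B =====
def build_dim_schedule_alt (T_max : Int) (stage_dims : List Int) (layers_per_stage : Int) (use_bottleneck8 : Bool) (bottleneck_after_dim : Int) (bottleneck_dim : Int) (bottleneck_layers : Int) (post_bottleneck_dim : Int) : List Int :=
  let schedule := stage_dims.flatMap (fun d => List.replicate layers_per_stage.toNat d)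
  if T_max ≤ 0 then []
  else if T_max ≤ (schedule.length : Int) then schedule.take T_max.toNat
  else
    let remaining := T_max - (schedule.length : Int)
    let floor := (PySem.List.pyGet? stage_dims (-1)).getD 0
    if use_bottleneck8 && (floor == bottleneck_after_dim) then
      let k := min (max bottleneck_layers 0) remaining
      schedule ++ List.replicate k.toNat bottleneck_dim ++ List.replicate (remaining - k).toNat post_bottleneck_dim
    else schedule ++ List.replicate remaining.toNat floor

-- ===== PRECONDITION & SPEC =====
-- Pre_ excludes exactly the inputs where A raises IndexError (stage_dims empty while
-- T_max exceeds the expanded schedule's length, so stage_dims[-1] is evaluated);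
-- B raises the same IndexError there.
def Pre_build_dim_schedule (T_max : Int) (stage_dims : List Int) (layers_per_stage : Int) (use_bottleneck8 : Bool) (bottleneck_after_dim : Int) (bottleneck_dim : Int) (bottleneck_layers : Int) (post_bottleneck_dim : Int) : Prop :=
  T_max ≤ (stage_dims.length * layers_per_stage.toNat : Nat) ∨ stage_dims ≠ []
instance (T_max : Int) (stage_dims : List Int) (layers_per_stage : Int) (use_bottleneck8 : Bool) (bottleneck_after_dim : Int) (bottleneck_dim : Int) (bottleneck_layers : Int) (post_bottleneck_dim : Int) : Decidable (Pre_build_dim_schedule T_max stage_dims layers_per_stage use_bottleneck8 bottleneck_after_dim bottleneck_dim bottleneck_layers post_bottleneck_dim) := by unfold Pre_build_dim_schedule; infer_instance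

def pvWitness_build_dim_schedule : Int × List Int × Int × Bool × Int × Int × Int × Int :=
  (7, [32, 16], 2, true, 16, 8, 1, 16)

def Spec_build_dim_schedule (T_max : Int) (stage_dims : List Int) (layers_per_stage : Int) (use_bottleneck8 : Bool) (bottleneck_after_dim : Int) (bottleneck_dim : Int) (bottleneck_layers : Int) (post_bottleneck_dim : Int) (out : List Int) : Prop := out = build_dim_schedule_alt T_max stage_dims layers_per_stage use_bottleneck8 bottleneck_after_dim bottleneck_dim bottleneck_layers post_bottleneck_dim
instance (T_max : Int) (stage_dims : List Int) (layers_per_stage : Int) (use_bottleneck8 : Bool) (bottleneck_after_dim : Int) (bottleneck_dim : Int) (bottleneck_layers : Int) (post_bottleneck_dim : Int) (out : List Int) : Decidable (Spec_build_dim_schedule T_max stage_dims layers_per_stage use_bottleneck8 bottleneck_after_dim bottleneck_dim bottleneck_layers post_bottleneck_dim out) := by unfold Spec_build_dim_schedule; infer_instance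

-- ===== CLAIM (what is proved, stated in full; the proofs are below) =====
def Claim_equal_build_dim_schedule : Prop := ∀ (T_max : Int) (stage_dims : List Int) (layers_per_stage : Int) (use_bottleneck8 : Bool) (bottleneck_after_dim : Int) (bottleneck_dim : Int) (bottleneck_layers : Int) (post_bottleneck_dim : Int), Dom_build_dim_schedule T_max stage_dims layers_per_stage use_bottleneck8 bottleneck_after_dim bottleneck_dim bottleneck_layers post_bottleneck_dim → Pre_build_dim_schedule T_max stage_dims layers_per_stage use_bottleneck8 bottleneck_after_dim bottleneck_dim bottleneck_layers post_bottleneck_dim → Spec_build_dim_schedule T_max stage_dims layers_per_stage use_bottleneck8 bottleneck_after_dim bottleneck_dim bottleneck_layers post_bottleneck_dim (build_dim_schedule T_max stage_dims layers_per_stage use_bottleneck8 bottleneck_after_dim bottleneck_dim bottleneck_layers post_bottleneck_dim)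

-- ===== LEMMAS AND PROOFS =====

theorem bds_flatMap_len (xs : List Int) (m : Nat) :
    (xs.flatMap (fun d => List.replicate m d)).length = xs.length * m := by
  induction xs with
  | nil => simp
  | cons x xs ih => simp [List.flatMap_cons, ih]; ring

theorem bds_schedule_eq (stage_dims : List Int) (m : Nat) :
    stage_dims.foldl (fun acc d => acc ++ List.replicate m d) [] =
      stage_dims.flatMap (fun d => List.replicate m d) := by
  have h : ∀ (xs : List Int) (acc : List Int),
      xs.foldl (fun acc d => acc ++ List.replicate m d) acc =
        acc ++ xs.flatMap (fun d => List.replicate m d) := by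
    intro xs
    induction xs with
    | nil => intro acc; simp
    | cons x xs ih => intro acc; simp [List.foldl_cons, List.flatMap_cons, ih]
  simpa using h stage_dims []

theorem bds_inner_spec (n : Nat) (T_max bd : Int) (out : List Int)
    (h : (out.length : Int) ≤ T_max) :
    bdsInnerFor n T_max bd out =
      out ++ List.replicate (min n (T_max - (out.length : Int)).toNat) bd := by
  induction n generalizing out with
  | zero => simp [bdsInnerFor]
  | succ n ih =>
    rw [bdsInnerFor]
    by_cases hge : (out.length : Int) ≥ T_max
    · rw [if_pos hge]
      have : (T_max - (out.length : Int)).toNat = 0 := by omega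
      simp [this]
    · rw [if_neg hge]
      rw [ih (out ++ [bd]) (by simp; omega)]
      have hcnt : min n (T_max - ((out ++ [bd]).length : Int)).toNat + 1 =
          min (n + 1) (T_max - (out.length : Int)).toNat := by simp; omega
      rw [List.append_assoc]
      congr 1
      rw [List.singleton_append, ← List.replicate_succ, hcnt]

theorem bds_fill_spec (f : Nat) (T_max pb : Int) (out : List Int)
    (h : f = (T_max - (out.length : Int)).toNat) :
    bdsWhileFill f T_max pb out = out ++ List.replicate f pb := by
  induction f generalizing out with
  | zero => simp [bdsWhileFill]
  | succ f ih =>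
    rw [bdsWhileFill]
    have hlt : (out.length : Int) < T_max := by omega
    rw [if_pos hlt, ih (out ++ [pb]) (by simp; omega)]
    rw [List.append_assoc, List.singleton_append, ← List.replicate_succ]

theorem bds_loop_post (f : Nat) (t : Int) (schedule stage_dims : List Int) (T_max : Int)
    (ub : Bool) (bad bd bl pb : Int) (out : List Int)
    (ht : (schedule.length : Int) < t)
    (hc : (ub && ((PySem.List.pyGet? stage_dims (-1)).getD 0 == bad)) = false) :
    bdsLoop f t schedule stage_dims T_max ub bad bd bl pb false out =
      out ++ List.replicate f ((PySem.List.pyGet? stage_dims (-1)).getD 0) := by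
  induction f generalizing t out with
  | zero => simp [bdsLoop]
  | succ f ih =>
    rw [bdsLoop]
    rw [if_neg (by omega)]
    simp only [Bool.not_false, Bool.and_true, hc]
    rw [if_neg (by simp)]
    rw [ih (t + 1) (out ++ [(PySem.List.pyGet? stage_dims (-1)).getD 0]) (by omega)]
    rw [List.append_assoc, List.singleton_append, ← List.replicate_succ]

theorem bds_loop_copy (f : Nat) (p : Nat) (schedule stage_dims : List Int) (T_max : Int)
    (ub : Bool) (bad bd bl pb : Int) (hp : p ≤ schedule.length) :
    bdsLoop f ((p : Int) + 1) schedule stage_dims T_max ub bad bd bl pb false (schedule.take p) =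
      if f ≤ schedule.length - p then schedule.take (p + f)
      else bdsLoop (f - (schedule.length - p)) ((schedule.length : Int) + 1)
        schedule stage_dims T_max ub bad bd bl pb false schedule := by
  induction f generalizing p with
  | zero => rw [if_pos (by omega)]; simp [bdsLoop]
  | succ f ih =>
    by_cases hpn : p < schedule.length
    · rw [bdsLoop]
      rw [if_pos (by omega)]
      have hidx : ((p : Int) + 1 - 1) = (p : Int) := by omega
      have hget : (PySem.List.pyGet? schedule ((p : Int) + 1 - 1)).getD 0 = schedule[p] := by
        rw [hidx, PySem.List.pyGet?_natCast, List.getElem?_eq_getElem hpn, Option.getD_some]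
      have htake : schedule.take p ++ [(PySem.List.pyGet? schedule ((p : Int) + 1 - 1)).getD 0] =
          schedule.take (p + 1) := by
        rw [hget, List.take_add_one, List.getElem?_eq_getElem hpn]; rfl
      rw [htake]
      have hcast : (p : Int) + 1 + 1 = ((p + 1 : Nat) : Int) + 1 := by push_cast [Nat.cast_add]; ring
      rw [hcast, ih (p + 1) (by omega)]
      by_cases hf : f + 1 ≤ schedule.length - p
      · rw [if_pos (by omega), if_pos (by omega)]
        congr 1; omega
      · rw [if_neg (by omega), if_neg (by omega)]
        congr 1; omega
    · have hpe : p = schedule.length := by omega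
      subst hpe
      rw [if_neg (by omega)]
      have : schedule.length - schedule.length = 0 := by omega
      rw [this, List.take_length, Nat.sub_zero]

-- ===== VERDICT (by name: the statement is the Claim_ definition above) =====
theorem build_dim_schedule_spec : Claim_equal_build_dim_schedule := by
  intro T_max stage_dims lps ub bad bd bl pb _hDom hPre
  unfold Spec_build_dim_schedule build_dim_schedule build_dim_schedule_alt
  simp only []
  rw [bds_schedule_eq]
  set S := stage_dims.flatMap (fun d => List.replicate lps.toNat d) with hS
  have hlen : S.length = stage_dims.length * lps.toNat := bds_flatMap_len stage_dims lps.toNat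
  have hcopy := bds_loop_copy T_max.toNat 0 S stage_dims T_max ub bad bd bl pb (by omega)
  simp only [Nat.cast_zero, zero_add, List.take_zero, Nat.sub_zero] at hcopy
  by_cases hT0 : T_max ≤ 0
  · have h0 : T_max.toNat = 0 := by omega
    rw [h0] at hcopy
    rw [if_pos (by omega)] at hcopy
    rw [h0, hcopy, if_pos hT0]
    simp [PySem.List.slice]
  · rw [if_neg hT0]
    by_cases hTn : T_max ≤ (S.length : Int)
    · rw [if_pos (by omega)] at hcopy
      rw [hcopy, if_pos hTn]
      rw [PySem.List.slice_to _ (by omega)]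
      simp
    · rw [if_neg (by omega)] at hcopy
      rw [if_neg hTn]
      have hsd : stage_dims ≠ [] := by
        rcases hPre with h | h
        · exfalso; omega
        · exact h
      set cf := (PySem.List.pyGet? stage_dims (-1)).getD 0 with hcf
      obtain ⟨m, hm⟩ : ∃ m, T_max.toNat - S.length = m + 1 := ⟨T_max.toNat - S.length - 1, by omega⟩
      rw [hm] at hcopy
      rw [hcopy, bdsLoop]
      rw [if_neg (by omega)]
      by_cases hcond : (ub && (cf == bad)) = true
      · rw [if_pos (by simp only [Bool.not_false, Bool.and_true]; exact hcond)]
        rw [if_pos hcond]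
        rw [bds_inner_spec bl.toNat T_max bd S (by omega)]
        rw [bds_fill_spec _ T_max pb _ rfl]
        set k := min (max bl 0) (T_max - (S.length : Int)) with hk
        have hk1 : min bl.toNat (T_max - (S.length : Int)).toNat = k.toNat := by omega
        rw [hk1]
        have hfill : (T_max - ((S ++ List.replicate k.toNat bd).length : Int)).toNat
            = (T_max - (S.length : Int) - k).toNat := by
          simp only [List.length_append, List.length_replicate]; omega
        rw [PySem.List.slice_to _ (by omega)]
        rw [List.take_of_length_le (by simp; omega)]
        rw [hfill]
      · rw [if_neg (by simp only [Bool.not_false, Bool.and_true]; exact hcond)]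
        rw [if_neg hcond]
        rw [bds_loop_post m ((S.length : Int) + 1 + 1) S stage_dims T_max ub bad bd bl pb
          (S ++ [cf]) (by omega) (by simp only [Bool.not_eq_true] at hcond; exact hcond)]
        rw [PySem.List.slice_to _ (by omega)]
        rw [List.take_of_length_le (by simp; omega)]
        rw [List.append_assoc, List.singleton_append, ← List.replicate_succ]
        have hrep : (T_max - (S.length : Int)).toNat = m + 1 := by omega
        rw [hrep]
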